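-- pv_equiv track=rewrite | github.com/YASSIRFRI/HNSieve | test_output.py | perform_range_queries
-- ===== SOURCE A (Python) =====
-- import bisect
--
-- def perform_range_queries(c_values, queries):
--     sorted_c = sorted(c_values)
--     results = []
--     for idx, (c_min, c_max) in enumerate(queries, 1):
--         left = bisect.bisect_left(sorted_c, c_min)
--         right = bisect.bisect_right(sorted_c, c_max)
--         count = right - left
--         results.append(count)
--     return results
-- ===== SOURCE B (Python) =====
-- def perform_range_queries(c_values, queries):
--     # No sorting, no bisect: one linear scan of c_values per query,
--     # maintaining two counters, and the answer is their difference
--     # (count of values <= c_max minus count of values < c_min).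
--     results = []
--     for c_min, c_max in queries:
--         le_max = 0
--         lt_min = 0
--         for v in c_values:
--             if v <= c_max:
--                 le_max += 1
--             if v < c_min:
--                 lt_min += 1
--         results.append(le_max - lt_min)
--     return results
-- ===== Notes on version B (the rewrite author's own statement) =====
-- stated objective: simpler
-- what changed: Replaces sort-once-plus-binary-search (bisect_left/bisect_right on a sorted copy) by a direct linear scan per query that maintains two counters (values <= c_max and values < c_min) and returns their difference; no sorted array or bisect is used.
import Mathlib
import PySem

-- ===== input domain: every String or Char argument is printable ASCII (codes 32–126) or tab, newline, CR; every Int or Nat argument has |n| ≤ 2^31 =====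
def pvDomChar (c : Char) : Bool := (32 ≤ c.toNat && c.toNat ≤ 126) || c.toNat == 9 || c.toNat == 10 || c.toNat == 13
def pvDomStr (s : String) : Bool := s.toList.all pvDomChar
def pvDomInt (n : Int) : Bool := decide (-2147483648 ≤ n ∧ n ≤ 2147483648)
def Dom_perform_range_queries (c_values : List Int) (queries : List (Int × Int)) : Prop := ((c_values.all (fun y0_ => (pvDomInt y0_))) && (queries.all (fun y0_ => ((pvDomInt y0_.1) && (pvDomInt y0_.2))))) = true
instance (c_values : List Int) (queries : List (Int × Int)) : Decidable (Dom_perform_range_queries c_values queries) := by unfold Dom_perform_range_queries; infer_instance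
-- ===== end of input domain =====

-- B replaces A's sort + bisect_left/bisect_right by a per-query linear scan keeping two
-- counters (values <= c_max, values < c_min) and returning their difference; objective: simpler.


-- ===== PORT A =====
-- sorted(c_values) then, per query, bisect_left/bisect_right on the sorted copy.
-- (the `idx` of `enumerate(queries, 1)` is unused in A's body, so the fold carries no index)
def perform_range_queries (c_values : List Int) (queries : List (Int × Int)) : List Int :=
  let sorted_c := PySem.List.sorted c_values (fun x => x) false
  queries.foldl (fun results q =>
    let left := PySem.List.bisectLeft sorted_c q.1
    let right := PySem.List.bisectRight sorted_c q.2
    let count : Int := (right : Int) - (left : Int)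
    results ++ [count]) []

-- ===== PORT B =====
def perform_range_queries_alt (c_values : List Int) (queries : List (Int × Int)) : List Int :=
  queries.foldl (fun results q =>
    let c := c_values.foldl (fun (p : Int × Int) v =>
      (if v ≤ q.2 then p.1 + 1 else p.1, if v < q.1 then p.2 + 1 else p.2)) (0, 0)
    results ++ [c.1 - c.2]) []

-- ===== PRECONDITION & SPEC =====
def Spec_perform_range_queries (c_values : List Int) (queries : List (Int × Int)) (out : List Int) : Prop := out = perform_range_queries_alt c_values queries
instance (c_values : List Int) (queries : List (Int × Int)) (out : List Int) : Decidable (Spec_perform_range_queries c_values queries out) := by unfold Spec_perform_range_queries; infer_instance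

-- ===== CLAIM (what is proved, stated in full; the proofs are below) =====
def Claim_equal_perform_range_queries : Prop := ∀ (c_values : List Int) (queries : List (Int × Int)), Dom_perform_range_queries c_values queries → Spec_perform_range_queries c_values queries (perform_range_queries c_values queries)

-- ===== LEMMAS AND PROOFS =====

-- B's inner fold computes the two countP's, shifted by the initial pair
theorem pvFoldCount (mn mx : Int) (xs : List Int) (p : Int × Int) :
    xs.foldl (fun (p : Int × Int) v =>
      (if v ≤ mx then p.1 + 1 else p.1, if v < mn then p.2 + 1 else p.2)) p
    = (p.1 + (xs.countP (fun v => decide (v ≤ mx)) : Int),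
       p.2 + (xs.countP (fun v => decide (v < mn)) : Int)) := by
  induction xs generalizing p with
  | nil => simp
  | cons x t ih =>
      simp only [List.foldl_cons, ih, List.countP_cons]
      refine Prod.ext ?_ ?_ <;> dsimp only <;> simp only [decide_eq_true_eq] <;> split_ifs <;> push_cast <;> ring

-- a split point characterises countP on any list
theorem pvCountP_eq_of_split (p : Int → Bool) (s : List Int) (k : Nat) (hk : k ≤ s.length)
    (hlt : ∀ j (hj : j < s.length), j < k → p s[j] = true)
    (hge : ∀ j (hj : j < s.length), k ≤ j → p s[j] = false) :
    s.countP p = k := by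
  have hsplit : s = s.take k ++ s.drop k := (List.take_append_drop k s).symm
  rw [hsplit, List.countP_append]
  have h1 : (s.take k).countP p = (s.take k).length := by
    rw [List.countP_eq_length]
    intro a ha
    obtain ⟨j, hj, rfl⟩ := List.mem_iff_getElem.mp ha
    have hjk : j < k := lt_of_lt_of_le hj (by simp)
    have hjs : j < s.length := lt_of_lt_of_le hjk hk
    have := List.getElem_take (xs := s) (i := j) (h := hj)
    rw [this]
    exact hlt j hjs hjk
  have h2 : (s.drop k).countP p = 0 := by
    rw [List.countP_eq_zero]
    intro a ha
    obtain ⟨j, hj, rfl⟩ := List.mem_iff_getElem.mp ha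
    have hjs : k + j < s.length := by
      have := hj; simp only [List.length_drop] at this; omega
    rw [List.getElem_drop]
    simp [hge (k + j) hjs (Nat.le_add_right k j)]
  rw [h1, h2, List.length_take]
  omega

theorem pvBisectLeft_eq_countP (c_values : List Int) (mn : Int) :
    (PySem.List.bisectLeft (PySem.List.sorted c_values (fun x => x) false) mn : Nat)
    = c_values.countP (fun v => decide (v < mn)) := by
  set s := PySem.List.sorted c_values (fun x => x) false with hs
  have hpair : s.Pairwise (fun a b => a ≤ b) := by
    simpa using PySem.List.sorted_pairwise c_values (fun x => x)
  obtain ⟨hle, hlt, hge⟩ := PySem.List.bisectLeft_spec s mn hpair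
  have := pvCountP_eq_of_split (fun v => decide (v < mn)) s (PySem.List.bisectLeft s mn) hle
    (fun j hj hjk => by simpa using hlt j hj hjk)
    (fun j hj hjk => by simpa using not_lt.mpr (hge j hj hjk))
  rw [← this]
  exact List.Perm.countP_eq _ (PySem.List.sorted_perm c_values (fun x => x) false)

theorem pvBisectRight_eq_countP (c_values : List Int) (mx : Int) :
    (PySem.List.bisectRight (PySem.List.sorted c_values (fun x => x) false) mx : Nat)
    = c_values.countP (fun v => decide (v ≤ mx)) := by
  set s := PySem.List.sorted c_values (fun x => x) false with hs
  have hpair : s.Pairwise (fun a b => a ≤ b) := by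
    simpa using PySem.List.sorted_pairwise c_values (fun x => x)
  obtain ⟨hle, hlt, hge⟩ := PySem.List.bisectRight_spec s mx hpair
  have := pvCountP_eq_of_split (fun v => decide (v ≤ mx)) s (PySem.List.bisectRight s mx) hle
    (fun j hj hjk => by simpa using hlt j hj hjk)
    (fun j hj hjk => by simpa using not_le.mpr (hge j hj hjk))
  rw [← this]
  exact List.Perm.countP_eq _ (PySem.List.sorted_perm c_values (fun x => x) false)

-- the two folds over queries agree for every accumulator
theorem pvFoldQueries (c_values : List Int) (queries : List (Int × Int)) (acc : List Int) :
    queries.foldl (fun results q =>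
      let left := PySem.List.bisectLeft (PySem.List.sorted c_values (fun x => x) false) q.1
      let right := PySem.List.bisectRight (PySem.List.sorted c_values (fun x => x) false) q.2
      let count : Int := (right : Int) - (left : Int)
      results ++ [count]) acc
    = queries.foldl (fun results q =>
      let c := c_values.foldl (fun (p : Int × Int) v =>
        (if v ≤ q.2 then p.1 + 1 else p.1, if v < q.1 then p.2 + 1 else p.2)) (0, 0)
      results ++ [c.1 - c.2]) acc := by
  induction queries generalizing acc with
  | nil => rfl
  | cons q t ih =>
      simp only [List.foldl_cons]
      rw [pvFoldCount q.1 q.2 c_values (0, 0)]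
      rw [← pvBisectLeft_eq_countP c_values q.1, ← pvBisectRight_eq_countP c_values q.2]
      simp only [Int.zero_add]
      exact ih _

-- ===== VERDICT (by name: the statement is the Claim_ definition above) =====
theorem perform_range_queries_spec : Claim_equal_perform_range_queries := by
  intro c_values queries _
  unfold Spec_perform_range_queries perform_range_queries perform_range_queries_alt
  exact pvFoldQueries c_values queries []
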